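-- pv_equiv track=rewrite | github.com/Nghia03092004/nghia03092004.github.io | project_euler_unified/problem_510/solution.py | find_solutions_brute
-- ===== SOURCE A (Python) =====
-- def check_descartes(a: int, b: int, c: int) -> bool:
--     """Check if (a, b, c) satisfies the tangent circle equation."""
--     lhs = a*a*b*b + b*b*c*c + a*a*c*c
--     rhs = 2*a*b*c*(a + b + c)
--     return lhs == rhs
--
-- def find_solutions_brute(N: int) -> list:
--     """Brute-force search for small N."""
--     solutions = []
--     for a in range(1, N + 1):
--         for b in range(a, N - a + 1):
--             for c in range(b, N - a - b + 1):
--                 if check_descartes(a, b, c):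
--                     solutions.append((a, b, c))
--     return solutions
-- ===== SOURCE B (Python) =====
-- def find_solutions_brute(N: int) -> list:
--     """For each (a, b), solve the tangent-circle equation as a quadratic in c.
--
--     With d = (a-b)^2 the equation is d*c^2 - 2ab(a+b)*c + a^2 b^2 = 0, whose
--     discriminant is 16 a^3 b^3: integer roots exist only when a*b is a perfect
--     square (and a == b never yields a c >= b).  A dict of squares gives the
--     square root in O(1), so the whole search is O(N^2) instead of O(N^3).
--     """
--     root = {}
--     for i in range(N + 1):
--         root[i * i] = i
--     solutions = []
--     for a in range(1, N + 1):
--         for b in range(a, N - a + 1):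
--             if a == b:
--                 continue
--             s = root.get(a * b)
--             if s is None:
--                 continue
--             d = (a - b) * (a - b)
--             for num in (a * b * (a + b - 2 * s), a * b * (a + b + 2 * s)):
--                 if num % d == 0:
--                     c = num // d
--                     if b <= c <= N - a - b:
--                         solutions.append((a, b, c))
--     return solutions
-- ===== Notes on version B (the rewrite author's own statement) =====
-- stated objective: faster
-- what changed: B drops A's innermost brute-force loop over c: for each (a,b) it solves the tangent-circle equation as a quadratic in c, whose integer roots exist only when a*b is a perfect square (tested via a precomputed dict mapping i*i to i), checking the at most two candidate roots against the range.
import Mathlib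
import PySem

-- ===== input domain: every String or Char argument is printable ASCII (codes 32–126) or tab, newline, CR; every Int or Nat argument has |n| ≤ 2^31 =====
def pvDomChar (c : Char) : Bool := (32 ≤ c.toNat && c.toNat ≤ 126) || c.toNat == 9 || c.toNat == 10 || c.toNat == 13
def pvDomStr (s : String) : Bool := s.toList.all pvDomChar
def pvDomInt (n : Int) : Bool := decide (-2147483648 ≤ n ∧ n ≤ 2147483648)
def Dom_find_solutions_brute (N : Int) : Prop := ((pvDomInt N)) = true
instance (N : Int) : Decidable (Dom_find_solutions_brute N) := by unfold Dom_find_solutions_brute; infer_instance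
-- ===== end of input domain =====

-- B replaces A's innermost scan over c by solving the tangent-circle equation as a quadratic
-- in c (integer roots exist only when a*b is a perfect square, detected via a precomputed
-- dict of squares), replacing the triple loop by a double loop.

-- ===== PORT A =====
def check_descartes (a b c : Int) : Bool :=
  let lhs := a*a*b*b + b*b*c*c + a*a*c*c
  let rhs := 2*a*b*c*(a + b + c)
  lhs == rhs

def find_solutions_brute (N : Int) : List (Int × Int × Int) :=
  (PySem.List.pyRange 1 (N + 1) 1).foldl (fun solutions a =>
    (PySem.List.pyRange a (N - a + 1) 1).foldl (fun solutions b =>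
      (PySem.List.pyRange b (N - a - b + 1) 1).foldl (fun solutions c =>
        if check_descartes a b c then solutions ++ [(a, b, c)] else solutions)
        solutions) solutions) []

-- ===== PORT B =====
def find_solutions_brute_alt (N : Int) : List (Int × Int × Int) :=
  let root : PySem.Dict Int Int :=
    (PySem.List.pyRange 0 (N + 1) 1).foldl (fun d i => d.insert (i * i) i) PySem.Dict.empty
  (PySem.List.pyRange 1 (N + 1) 1).foldl (fun solutions a =>
    (PySem.List.pyRange a (N - a + 1) 1).foldl (fun solutions b =>
      if a == b then solutions else
      match root.get? (a * b) with
      | none => solutions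
      | some s =>
        let d := (a - b) * (a - b)
        [a * b * (a + b - 2 * s), a * b * (a + b + 2 * s)].foldl (fun solutions num =>
          if PySem.Int.mod num d == 0 then
            let c := PySem.Int.floordiv num d
            if b ≤ c ∧ c ≤ N - a - b then solutions ++ [(a, b, c)] else solutions
          else solutions) solutions) solutions) []

-- ===== PRECONDITION & SPEC =====
def Spec_find_solutions_brute (N : Int) (out : List (Int × Int × Int)) : Prop := out = find_solutions_brute_alt N
instance (N : Int) (out : List (Int × Int × Int)) : Decidable (Spec_find_solutions_brute N out) := by unfold Spec_find_solutions_brute; infer_instance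

-- ===== CLAIM (what is proved, stated in full; the proofs are below) =====
def Claim_equal_find_solutions_brute : Prop := ∀ (N : Int), Dom_find_solutions_brute N → Spec_find_solutions_brute N (find_solutions_brute N)

-- ===== LEMMAS AND PROOFS =====

lemma sq_eq_iff (x y : Int) : x ^ 2 = y ^ 2 ↔ x = y ∨ x = -y := by
  constructor
  · intro h
    have h0 : (x - y) * (x + y) = 0 := by nlinarith
    rcases mul_eq_zero.mp h0 with h1 | h1
    · left; linarith
    · right; linarith
  · rintro (rfl | rfl) <;> ring

-- the tangent-circle equation, multiplied through by (a-b)^2, completes to a square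
lemma check_iff (a b c : Int) (hab : a ≠ b) :
    check_descartes a b c = true ↔
      ((a - b) * (a - b) * c - a * b * (a + b)) ^ 2 = 4 * (a * b) ^ 3 := by
  have hd : (a - b) * (a - b) ≠ 0 := by
    intro h; apply hab; nlinarith [sq_nonneg (a - b)]
  simp only [check_descartes, beq_iff_eq]
  constructor
  · intro h; nlinarith [h]
  · intro h
    have key : (a - b) * (a - b) *
        ((a*a*b*b + b*b*c*c + a*a*c*c) - 2*a*b*c*(a + b + c)) = 0 := by nlinarith [h]
    rcases mul_eq_zero.mp key with h1 | h2
    · exact absurd h1 hd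
    · linarith

-- on the diagonal a = b the equation forces a = 4c, impossible for c ≥ a ≥ 1
lemma check_diag (a c : Int) (ha : 1 ≤ a) (hc : a ≤ c) : check_descartes a a c = false := by
  simp only [check_descartes, beq_eq_false_iff_ne, ne_eq]
  intro h
  have h3 : 0 < a * a * a := by positivity
  have h4 : a < 4 * c := by linarith
  nlinarith [mul_lt_mul_of_pos_left h4 h3]

-- if 4(ab)^3 is a perfect square then so is ab
lemma sq_of_sq (t a b : Int) (hab : 0 < a * b) (ht : t ^ 2 = 4 * (a * b) ^ 3) :
    ∃ u, 0 ≤ u ∧ u * u = a * b := by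
  have hg : (2 * (a * b)) ≠ 0 := by positivity
  have hdvd : (2 * (a * b)) ^ 2 ∣ t ^ 2 := ⟨a * b, by ring_nf; linarith [ht]⟩
  have h2 : (2 * (a * b)) ∣ t := (Int.pow_dvd_pow_iff two_ne_zero).mp hdvd
  obtain ⟨u, hu⟩ := h2
  refine ⟨|u|, abs_nonneg u, ?_⟩
  have heq : (2 * (a * b)) ^ 2 * (u * u) = (2 * (a * b)) ^ 2 * (a * b) := by
    rw [hu] at ht; ring_nf; ring_nf at ht; linarith [ht]
  have := mul_left_cancel₀ (pow_ne_zero 2 hg) heq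
  rw [abs_mul_abs_self]; exact this

-- a filter by a disjunction of two separated at-most-once predicates splits on a sorted list
lemma filter_or_sorted (P1 P2 : Int → Prop) [DecidablePred P1] [DecidablePred P2]
    (l : List Int) (hl : l.Pairwise (· < ·))
    (u1 : ∀ x y, P1 x → P1 y → x = y)
    (sep : ∀ x y, P1 x → P2 y → x < y) :
    l.filter (fun c => decide (P1 c ∨ P2 c)) =
      l.filter (fun c => decide (P1 c)) ++ l.filter (fun c => decide (P2 c)) := by
  induction l with
  | nil => simp
  | cons x t ih =>
    have hlt : ∀ y ∈ t, x < y := fun y hy => (List.pairwise_cons.mp hl).1 y hy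
    have ht : t.Pairwise (· < ·) := (List.pairwise_cons.mp hl).2
    by_cases h1 : P1 x
    · have h2 : ¬ P2 x := fun h2 => lt_irrefl x (sep x x h1 h2)
      have e1 : t.filter (fun c => decide (P1 c)) = [] := by
        rw [List.filter_eq_nil_iff]
        intro y hy hPy
        exact absurd (u1 x y h1 (of_decide_eq_true hPy)) (ne_of_lt (hlt y hy))
      simp only [List.filter_cons, decide_eq_true_eq]
      rw [if_pos (Or.inl h1), if_pos h1, if_neg h2, ih ht, e1]
      simp
    · by_cases h2 : P2 x
      · have e1 : t.filter (fun c => decide (P1 c)) = [] := by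
          rw [List.filter_eq_nil_iff]
          intro y hy hPy
          exact absurd (sep y x (of_decide_eq_true hPy) h2) (not_lt.mpr (le_of_lt (hlt y hy)))
        have e1' : (x :: t).filter (fun c => decide (P1 c)) = [] := by
          simp only [List.filter_cons, decide_eq_true_eq, if_neg h1]; exact e1
        rw [e1']
        simp only [List.filter_cons, decide_eq_true_eq]
        rw [if_pos (Or.inr h2), if_pos h2, ih ht, e1]
        simp
      · simp only [List.filter_cons, decide_eq_true_eq]
        rw [if_neg (by tauto), if_neg h1, if_neg h2, ih ht]

lemma filter_eq_singleton (l : List Int) (hnd : l.Nodup) (r : Int) (hr : r ∈ l) :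
    l.filter (fun c => decide (c = r)) = [r] := by
  induction l with
  | nil => cases hr
  | cons x t ih =>
    rcases List.mem_cons.mp hr with h | h
    · have hfil : t.filter (fun c => decide (c = r)) = [] := by
        rw [List.filter_eq_nil_iff]
        intro y hy hPy
        rw [of_decide_eq_true hPy] at hy
        rw [h] at hy
        exact (List.nodup_cons.mp hnd).1 hy
      subst h
      simp [hfil]
    · have hx : ¬ (x = r) := fun e => (List.nodup_cons.mp hnd).1 (e ▸ h)
      simp only [List.filter_cons, decide_eq_true_eq, if_neg hx]
      exact ih (List.nodup_cons.mp hnd).2 h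

-- the candidates from one root of the quadratic: the filtered range collapses to B's test
lemma root_piece (a b lo hi d n : Int) (hd : 0 < d) :
    ((PySem.List.pyRange lo hi 1).filter (fun c => decide (d * c = n))).map
        (fun c => ((a, b, c) : Int × Int × Int)) =
      (if PySem.Int.mod n d == 0 then
        (if lo ≤ PySem.Int.floordiv n d ∧ PySem.Int.floordiv n d < hi then
          [(a, b, PySem.Int.floordiv n d)] else [])
      else []) := by
  by_cases hdvd : d ∣ n
  · have hmod : PySem.Int.mod n d == 0 := by
      simp [PySem.Int.mod_eq_zero_iff_dvd, hdvd]
    rw [if_pos hmod]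
    set r := PySem.Int.floordiv n d with hr
    have hdr : d * r = n := by
      have h0 := PySem.Int.floordiv_mul_add_mod n d
      have hm0 : PySem.Int.mod n d = 0 := (PySem.Int.mod_eq_zero_iff_dvd n d).mpr hdvd
      rw [hm0] at h0; linarith
    have hpred : ∀ c : Int, (d * c = n) ↔ c = r := by
      intro c
      constructor
      · intro h
        exact mul_left_cancel₀ (ne_of_gt hd) (by rw [h, hdr])
      · intro h; rw [h, hdr]
    by_cases hin : lo ≤ r ∧ r < hi
    · rw [if_pos hin]
      have hmem : r ∈ PySem.List.pyRange lo hi 1 := by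
        rw [PySem.List.mem_pyRange_one]; exact hin
      have hcongr : (PySem.List.pyRange lo hi 1).filter (fun c => decide (d * c = n)) =
          (PySem.List.pyRange lo hi 1).filter (fun c => decide (c = r)) := by
        apply List.filter_congr; intro c hc; simp [hpred c]
      rw [hcongr, filter_eq_singleton _ (PySem.List.nodup_pyRange_one lo hi) r hmem]
      simp
    · rw [if_neg hin]
      have hfil : (PySem.List.pyRange lo hi 1).filter (fun c => decide (d * c = n)) = [] := by
        rw [List.filter_eq_nil_iff]
        intro c hc hP
        have := (hpred c).mp (of_decide_eq_true hP)
        subst this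
        exact hin (PySem.List.mem_pyRange_one.mp hc)
      rw [hfil]; simp
  · have hmod : ¬ (PySem.Int.mod n d == 0) := by
      simp [PySem.Int.mod_eq_zero_iff_dvd, hdvd]
    rw [if_neg (by simpa using hmod)]
    have hfil : (PySem.List.pyRange lo hi 1).filter (fun c => decide (d * c = n)) = [] := by
      rw [List.filter_eq_nil_iff]
      intro c hc hP
      exact hdvd ⟨c, (of_decide_eq_true hP).symm⟩
    rw [hfil]; simp

-- B's dict of squares: its items are exactly (i*i, i) for i in range(N+1)
lemma sqrtDict_items (N : Int) :
    ((PySem.List.pyRange 0 (N + 1) 1).foldl (fun d i => d.insert (i * i) i)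
      (PySem.Dict.empty : PySem.Dict Int Int)).items =
    (PySem.List.pyRange 0 (N + 1) 1).map (fun i => (i * i, i)) := by
  have hnd : ((PySem.List.pyRange 0 (N + 1) 1).map (fun i => i * i)).Nodup := by
    refine List.Nodup.map_on ?_ (PySem.List.nodup_pyRange_one 0 (N + 1))
    intro x hx y hy hxy
    have hx0 : 0 ≤ x := (PySem.List.mem_pyRange_one.mp hx).1
    have hy0 : 0 ≤ y := (PySem.List.mem_pyRange_one.mp hy).1
    nlinarith
  have h := PySem.Dict.items_foldl_insert_fresh
    (l := PySem.List.pyRange 0 (N + 1) 1) (d := (PySem.Dict.empty : PySem.Dict Int Int))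
    (k := fun i => i * i) (v := fun i => i)
    (by intro a ha; exact PySem.Dict.contains_empty _) hnd
  simpa using h

-- a successful lookup is an exact nonnegative square root
lemma sqrtDict_some (N k s : Int)
    (h : ((PySem.List.pyRange 0 (N + 1) 1).foldl (fun d i => d.insert (i * i) i)
          (PySem.Dict.empty : PySem.Dict Int Int)).get? k = some s) :
    0 ≤ s ∧ s * s = k := by
  have hmem := PySem.Dict.mem_items_of_get?_eq_some _ h
  rw [sqrtDict_items] at hmem
  obtain ⟨i, hi, he⟩ := List.mem_map.mp hmem
  have h1 : i * i = k := congrArg Prod.fst he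
  have h2 : i = s := congrArg Prod.snd he
  subst h2
  exact ⟨(PySem.List.mem_pyRange_one.mp hi).1, h1⟩

-- a failed lookup means no square root in [0, N] exists
lemma sqrtDict_none (N k : Int)
    (h : ((PySem.List.pyRange 0 (N + 1) 1).foldl (fun d i => d.insert (i * i) i)
          (PySem.Dict.empty : PySem.Dict Int Int)).get? k = none)
    (u : Int) (hu : 0 ≤ u) (huN : u ≤ N) : u * u ≠ k := by
  intro he
  rw [PySem.Dict.get?_eq_none_iff_not_mem_keys] at h
  apply h
  have hmem : (k, u) ∈ ((PySem.List.pyRange 0 (N + 1) 1).foldl (fun d i => d.insert (i * i) i)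
      (PySem.Dict.empty : PySem.Dict Int Int)).items := by
    rw [sqrtDict_items]
    exact List.mem_map.mpr ⟨u, PySem.List.mem_pyRange_one.mpr ⟨hu, by omega⟩, by rw [he]⟩
  exact PySem.Dict.mem_keys_of_mem_items _ hmem

-- one step of B's two-candidate loop, as an append
lemma Fstep (N a b d n : Int) (acc : List (Int × Int × Int)) :
    (if PySem.Int.mod n d == 0 then
      (let c := PySem.Int.floordiv n d
       if b ≤ c ∧ c ≤ N - a - b then acc ++ [(a, b, c)] else acc)
    else acc) =
    acc ++ (if PySem.Int.mod n d == 0 then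
      (if b ≤ PySem.Int.floordiv n d ∧ PySem.Int.floordiv n d < N - a - b + 1 then
        [(a, b, PySem.Int.floordiv n d)] else []) else []) := by
  dsimp only []
  split_ifs with h1 h2 h3 <;> simp_all
  omega

-- the heart of the equivalence: for one pair (a, b), A's scan over c equals B's root test
lemma pair_eq (N a b : Int) (ha : 1 ≤ a) (haN : a < N + 1) (hab1 : a ≤ b) (hbN : b < N - a + 1)
    (acc : List (Int × Int × Int)) :
    (PySem.List.pyRange b (N - a - b + 1) 1).foldl
      (fun solutions c => if check_descartes a b c then solutions ++ [(a, b, c)] else solutions)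
      acc =
    (if a == b then acc else
      match ((PySem.List.pyRange 0 (N + 1) 1).foldl (fun d i => d.insert (i * i) i)
          (PySem.Dict.empty : PySem.Dict Int Int)).get? (a * b) with
      | none => acc
      | some s =>
        let d := (a - b) * (a - b)
        [a * b * (a + b - 2 * s), a * b * (a + b + 2 * s)].foldl (fun solutions num =>
          if PySem.Int.mod num d == 0 then
            let c := PySem.Int.floordiv num d
            if b ≤ c ∧ c ≤ N - a - b then solutions ++ [(a, b, c)] else solutions
          else solutions) acc) := by
  rw [PySem.List.foldl_append_if]
  by_cases hab : a = b
  · subst hab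
    rw [if_pos (by simp)]
    have hfil : (PySem.List.pyRange a (N - a - a + 1) 1).filter
        (fun c => check_descartes a a c) = [] := by
      rw [List.filter_eq_nil_iff]
      intro c hc hchk
      have hac : a ≤ c := (PySem.List.mem_pyRange_one.mp hc).1
      rw [check_diag a c ha hac] at hchk
      exact absurd hchk (by simp)
    rw [hfil]; simp
  · rw [if_neg (by simpa using hab)]
    have hb1 : 1 ≤ b := le_trans ha hab1
    have hab0 : 0 < a * b := mul_pos (by omega) (by omega)
    have hd : 0 < (a - b) * (a - b) := mul_self_pos.mpr (sub_ne_zero.mpr hab)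
    cases hget : ((PySem.List.pyRange 0 (N + 1) 1).foldl (fun d i => d.insert (i * i) i)
        (PySem.Dict.empty : PySem.Dict Int Int)).get? (a * b) with
    | none =>
      have hfil : (PySem.List.pyRange b (N - a - b + 1) 1).filter
          (fun c => check_descartes a b c) = [] := by
        rw [List.filter_eq_nil_iff]
        intro c hc hchk
        have hM := (check_iff a b c hab).mp hchk
        obtain ⟨u, hu0, huu⟩ := sq_of_sq _ a b hab0 hM
        have huN : u ≤ N := by nlinarith [sq_nonneg (N - 2 * a)]
        exact sqrtDict_none N (a * b) hget u hu0 huN huu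
      rw [hfil]; simp
    | some s =>
      obtain ⟨hs0, hss⟩ := sqrtDict_some N (a * b) s hget
      have hs1 : 1 ≤ s := by nlinarith
      dsimp only [List.foldl_cons, List.foldl_nil]
      rw [Fstep, Fstep, List.append_assoc]
      congr 1
      have hpred : ∀ c ∈ PySem.List.pyRange b (N - a - b + 1) 1,
          (fun c => check_descartes a b c) c =
          (fun c => decide ((a - b) * (a - b) * c = a * b * (a + b - 2 * s) ∨
                            (a - b) * (a - b) * c = a * b * (a + b + 2 * s))) c := by
        intro c _
        have hiff : check_descartes a b c = true ↔
            ((a - b) * (a - b) * c = a * b * (a + b - 2 * s) ∨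
             (a - b) * (a - b) * c = a * b * (a + b + 2 * s)) := by
          rw [check_iff a b c hab]
          have h4 : 4 * (a * b) ^ 3 = (2 * a * b * s) ^ 2 := by
            linear_combination (-4 * a ^ 2 * b ^ 2) * hss
          rw [h4, sq_eq_iff]
          constructor
          · rintro (h | h)
            · right; linear_combination h
            · left; linear_combination h
          · rintro (h | h)
            · right; linear_combination h
            · left; linear_combination h
        cases hchk : check_descartes a b c
        · simp only [hchk]
          symm; rw [decide_eq_false_iff_not]
          intro hcontra
          rw [← hiff] at hcontra; rw [hchk] at hcontra; exact absurd hcontra (by simp)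
        · simp only [hchk]
          symm; rw [decide_eq_true_eq]
          exact hiff.mp hchk
      rw [List.filter_congr hpred]
      have hn12 : a * b * (a + b - 2 * s) < a * b * (a + b + 2 * s) := by nlinarith
      rw [filter_or_sorted _ _ _ (PySem.List.pairwise_lt_pyRange_one b (N - a - b + 1))
        (fun x y hx hy => mul_left_cancel₀ (ne_of_gt hd) (hx.trans hy.symm))
        (fun x y hx hy => lt_of_mul_lt_mul_left (by rw [hx, hy]; exact hn12) (le_of_lt hd))]
      rw [List.map_append,
        root_piece a b b (N - a - b + 1) ((a - b) * (a - b)) (a * b * (a + b - 2 * s)) hd,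
        root_piece a b b (N - a - b + 1) ((a - b) * (a - b)) (a * b * (a + b + 2 * s)) hd]

lemma main_eq (N : Int) : find_solutions_brute N = find_solutions_brute_alt N := by
  unfold find_solutions_brute find_solutions_brute_alt
  dsimp only []
  apply PySem.List.foldl_congr_mem
  intro acc a ha
  obtain ⟨ha1, haN⟩ := PySem.List.mem_pyRange_one.mp ha
  apply PySem.List.foldl_congr_mem
  intro acc' b hb
  obtain ⟨hab1, hbN⟩ := PySem.List.mem_pyRange_one.mp hb
  exact pair_eq N a b ha1 haN hab1 hbN acc'

-- ===== VERDICT (by name: the statement is the Claim_ definition above) =====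
theorem find_solutions_brute_spec : Claim_equal_find_solutions_brute := by
  intro N _
  exact main_eq N
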